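-- pv_equiv track=rewrite | github.com/minhyukkk/CodeTest | 프로그래머스/unrated/140108. 문자열 나누기/문자열 나누기.py | solution
-- ===== SOURCE A (Python) =====
-- def solution(s):
--     answer = 0
--     c1 = 0
--     c2 = 0
--     for i in s:
--         if c1 == c2:
--             answer += 1
--             k = i
--         if k == i:
--             c1 += 1
--         else:
--             c2 += 1
--     return answer
-- ===== SOURCE B (Python) =====
-- def segment_end(s, i, n):
--     # End (exclusive) of the balanced segment starting at i: the anchor s[i] must
--     # occur in exactly half of the segment, i.e. first j with 2*eq == j - i + 1.
--     a = s[i]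
--     eq = 0
--     for j in range(i, n):
--         eq += (s[j] == a)
--         if 2 * eq == j - i + 1:
--             return j + 1
--     return n
--
-- def solution(s):
--     # Staged decomposition: repeatedly locate the end of the current segment
--     # (counting only anchor occurrences), jump there, and count segments.
--     n = len(s)
--     count = 0
--     i = 0
--     while i < n:
--         i = segment_end(s, i, n)
--         count += 1
--     return count
-- ===== Notes on version B (the rewrite author's own statement) =====
-- stated objective: alternative
-- what changed: B replaces A's single fold carrying two per-segment counters by a two-stage index decomposition: a segment_end scanner that counts only anchor occurrences and cuts at the first prefix length j with 2*eq == j - i + 1, plus an outer jump-and-count loop over segment starts.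
import Mathlib
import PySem

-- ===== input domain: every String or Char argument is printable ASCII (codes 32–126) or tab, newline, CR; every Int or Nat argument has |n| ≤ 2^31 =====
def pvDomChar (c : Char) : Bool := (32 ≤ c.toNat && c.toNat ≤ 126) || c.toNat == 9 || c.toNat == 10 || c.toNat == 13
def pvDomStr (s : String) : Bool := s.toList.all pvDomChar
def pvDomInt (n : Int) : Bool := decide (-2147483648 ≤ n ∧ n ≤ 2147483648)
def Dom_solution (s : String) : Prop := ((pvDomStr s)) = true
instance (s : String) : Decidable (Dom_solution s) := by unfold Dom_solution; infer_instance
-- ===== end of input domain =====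

-- B splits the work in two stages — an index-based `segment_end` scanner that counts only
-- anchor occurrences (cut at 2*eq = j - i + 1) and an outer jump-and-count loop — instead
-- of A's single fold carrying two counters; alternative decomposition, same cost.

-- ===== PORT A =====
-- A's `k` is unassigned before the loop but is always set (c1 == c2 on the first
-- iteration) before it is read; the initial ' ' placeholder is never compared.
def solutionStep (st : Int × Int × Int × Char) (i : Char) : Int × Int × Int × Char :=
  let (answer, c1, c2, k) := st
  let (answer, k) := if c1 = c2 then (answer + 1, i) else (answer, k)
  if k = i then (answer, c1 + 1, c2, k) else (answer, c1, c2 + 1, k)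

def solution (s : String) : Int :=
  (s.toList.foldl solutionStep (0, 0, 0, ' ')).1

-- ===== PORT B =====
-- Source B's `for j in range(i, n)` with an early `return j + 1` becomes the structural
-- recursion segGo on the fuel `n - j` (exactly the number of iterations left, so the
-- fuel never runs out while j < n); every access s[j] (and s[i] below) has
-- 0 ≤ i ≤ j < n = len(s), so `l.getD j ' '` is exactly Python's s[j].
def segGo (l : List Char) (a : Char) (i n : Nat) : Nat → Nat → Int → Nat
  | 0, _, _ => n
  | fuel + 1, j, eq =>
    if j < n then
      let eq := eq + (if l.getD j ' ' = a then 1 else 0)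
      if 2 * eq = (j : Int) - (i : Int) + 1 then j + 1 else segGo l a i n fuel (j + 1) eq
    else n

def segmentEnd (l : List Char) (i n : Nat) : Nat :=
  segGo l (l.getD i ' ') i n (n - i) i 0

-- Source B's `while i < n` loop, again on the fuel `n - i` (each pass strictly increases i).
def solGo (l : List Char) (n : Nat) : Nat → Nat → Int → Int
  | 0, _, count => count
  | fuel + 1, i, count =>
    if i < n then solGo l n fuel (segmentEnd l i n) (count + 1) else count

def solution_alt (s : String) : Int :=
  solGo s.toList s.toList.length s.toList.length 0 0

-- ===== PRECONDITION & SPEC =====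
def Spec_solution (s : String) (out : Int) : Prop := out = solution_alt s
instance (s : String) (out : Int) : Decidable (Spec_solution s out) := by unfold Spec_solution; infer_instance

-- ===== CLAIM (what is proved, stated in full; the proofs are below) =====
def Claim_equal_solution : Prop := ∀ (s : String), Dom_solution s → Spec_solution s (solution s)

-- ===== LEMMAS AND PROOFS =====

/-- The scanner's result lies between `j` and `n` (whenever its fuel suffices). -/
theorem segGo_bounds (l : List Char) (a : Char) (i n : Nat) :
    ∀ (k j : Nat) (eq : Int), j ≤ n →
      j ≤ segGo l a i n k j eq ∧ segGo l a i n k j eq ≤ n := by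
  intro k
  induction k with
  | zero => intro j eq hj; simp [segGo]; omega
  | succ m ih =>
      intro j eq hj
      simp only [segGo]
      by_cases hjn : j < n
      · rw [if_pos hjn]
        by_cases hcut : 2 * (eq + (if l.getD j ' ' = a then 1 else 0)) = (j : Int) - (i : Int) + 1
        · rw [if_pos hcut]; omega
        · rw [if_neg hcut]
          have := ih (j + 1) (eq + (if l.getD j ' ' = a then 1 else 0)) (by omega)
          omega
      · rw [if_neg hjn]; omega

/-- Mid-segment invariant: while A's balance `c1 - c2 = 2*eq - (j - i)` stays positive,
A's fold over the rest of the string reaches, at B's scanner cut `segGo … j eq`, a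
fresh state `(ans, c, c, a)` (and if the scanner runs off the end both sides are `ans`). -/
theorem solution_mid (l : List Char) (a : Char) (i n : Nat) (hn : n = l.length) :
    ∀ (k j : Nat) (eq c1 c2 ans : Int), n - j ≤ k → j ≤ n →
      c1 - c2 = 2 * eq - ((j : Int) - (i : Int)) → 0 < c1 - c2 →
      ∃ c : Int,
        ((l.drop j).foldl solutionStep (ans, c1, c2, a)).1 =
          ((l.drop (segGo l a i n k j eq)).foldl solutionStep (ans, c, c, a)).1 := by
  intro k
  induction k with
  | zero =>
      intro j eq c1 c2 ans hk hj _ _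
      have hnil : List.drop j l = [] := List.drop_eq_nil_of_le (by omega)
      have hniln : List.drop n l = [] := List.drop_eq_nil_of_le (by omega)
      simp only [segGo]
      exact ⟨c1, by rw [hnil, hniln]; rfl⟩
  | succ m ih =>
      intro j eq c1 c2 ans hk hj hbal hpos
      by_cases hjn : j < n
      · have hjl : j < l.length := by omega
        have hdrop : l.drop j = l[j] :: l.drop (j + 1) := List.drop_eq_getElem_cons hjl
        have hne : ¬ c1 = c2 := by omega
        have hgetD : l.getD j ' ' = l[j] := List.getD_eq_getElem l ' ' hjl
        simp only [segGo]
        rw [if_pos hjn, hgetD, hdrop]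
        simp only [List.foldl]
        by_cases hch : l[j] = a
        · have hka : a = l[j] := hch.symm
          simp only [solutionStep, if_neg hne, hch, if_true]
          by_cases hcut : 2 * (eq + 1) = (j : Int) - (i : Int) + 1
          · rw [if_pos hcut]
            refine ⟨c2, ?_⟩
            have hcc : c1 + 1 = c2 := by omega
            rw [hcc]
          · rw [if_neg hcut]
            exact ih (j + 1) (eq + 1) (c1 + 1) c2 ans (by omega) (by omega) (by push_cast; omega) (by omega)
        · have hka : ¬ a = l[j] := fun h => hch h.symm
          simp only [solutionStep, if_neg hne, if_neg hka, hch, if_false]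
          by_cases hcut : 2 * (eq + 0) = (j : Int) - (i : Int) + 1
          · rw [if_pos hcut]
            refine ⟨c1, ?_⟩
            have hcc : c2 + 1 = c1 := by omega
            rw [hcc]
          · rw [if_neg hcut]
            have h := ih (j + 1) eq c1 (c2 + 1) ans (by omega) (by omega) (by push_cast; omega) (by omega)
            simpa using h
      · have hnil : List.drop j l = [] := List.drop_eq_nil_of_le (by omega)
        have hniln : List.drop n l = [] := List.drop_eq_nil_of_le (by omega)
        simp only [segGo]
        rw [if_neg hjn]
        exact ⟨c1, by rw [hnil, hniln]; rfl⟩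

/-- One unfolding of `segment_end` at a segment start `i < n`: the first character is the
anchor itself, so the scan continues at `j = i + 1` with `eq = 1`. -/
theorem segmentEnd_unfold (l : List Char) (i n : Nat) (hin : i < n) (hn : n = l.length) :
    segmentEnd l i n = segGo l (l.getD i ' ') i n (n - (i + 1)) (i + 1) 1 := by
  unfold segmentEnd
  have hfe : n - i = (n - (i + 1)) + 1 := by omega
  rw [hfe]
  simp only [segGo]
  rw [if_pos hin]
  have hii : ((i : Int) - (i : Int) + 1) = 1 := by omega
  rw [hii]
  norm_num

/-- From a fresh A-state at position `i`, the rest of A's fold computes B's outer loop. -/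
theorem solution_fresh (l : List Char) (n : Nat) (hn : n = l.length) :
    ∀ (k i : Nat), n - i ≤ k → i ≤ n → ∀ (ans c : Int) (kch : Char),
      ((l.drop i).foldl solutionStep (ans, c, c, kch)).1 = solGo l n k i ans := by
  intro k
  induction k with
  | zero =>
      intro i hk hi ans c kch
      have hin : i = n := by omega
      simp only [solGo]
      subst hin
      simp [hn]
  | succ m ih =>
      intro i hk hi ans c kch
      by_cases hin : i < n
      · have hil : i < l.length := by omega
        have hdrop : l.drop i = l[i] :: l.drop (i + 1) := List.drop_eq_getElem_cons hil
        have hgetD : l.getD i ' ' = l[i] := List.getD_eq_getElem l ' ' hil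
        have hstep : ((l.drop i).foldl solutionStep (ans, c, c, kch)).1 =
            ((l.drop (i + 1)).foldl solutionStep (ans + 1, c + 1, c, l[i])).1 := by
          rw [hdrop]; simp [List.foldl, solutionStep]
        have hseg : segmentEnd l i n = segGo l l[i] i n (n - (i + 1)) (i + 1) 1 := by
          rw [segmentEnd_unfold l i n hin hn, hgetD]
        have hbounds := segGo_bounds l l[i] i n (n - (i + 1)) (i + 1) 1 (by omega)
        obtain ⟨c', hc'⟩ := solution_mid l l[i] i n hn (n - (i + 1)) (i + 1) 1 (c + 1) c (ans + 1)
          (by omega) (by omega) (by push_cast; omega) (by omega)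
        simp only [solGo]
        rw [if_pos hin, hstep, hc', ← hseg]
        exact ih (segmentEnd l i n) (by rw [hseg]; omega) (by rw [hseg]; omega) (ans + 1) c' l[i]
      · simp only [solGo]
        rw [if_neg hin]
        have : i = n := by omega
        subst this
        simp [hn]

-- ===== VERDICT (by name: the statement is the Claim_ definition above) =====
theorem solution_spec : Claim_equal_solution := by
  intro s _
  show solution s = solution_alt s
  unfold solution solution_alt
  have := solution_fresh s.toList s.toList.length rfl s.toList.length 0 (by omega) (by omega) 0 0 ' '
  simpa using this
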